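-- pv_equiv track=rewrite | github.com/vanyakosmos/advent_of_code | 2024/21/1.py | type_keypad
-- ===== SOURCE A (Python) =====
-- def type_keypad(code: str) -> str:
--     pad_map = {
--         "^": (0, 1),
--         "A": (0, 2),
--         "<": (1, 0),
--         "v": (1, 1),
--         ">": (1, 2),
--     }
--     moves = ""
--     cy, cx = pad_map["A"]
--     for n in code:
--         ny, nx = pad_map[n]
--         if cy > ny:
--             if n != "<":
--                 moves += "^" * (cy - ny)
--             if cx > nx:
--                 moves += "<" * (cx - nx)
--             else:
--                 moves += ">" * (nx - cx)
--             if n == "<":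
--                 moves += "^" * (cy - ny)
--         else:
--             if n == "<":
--                 moves += "v" * (ny - cy)
--             if cx > nx:
--                 moves += "<" * (cx - nx)
--             else:
--                 moves += ">" * (nx - cx)
--             if n != "<":
--                 moves += "v" * (ny - cy)
--         cy, cx = ny, nx
--         moves += "A"
--     return moves
-- ===== SOURCE B (Python) =====
-- # Precomputed transition table: one move-string per ordered pair of buttons,
-- # then a single lookup pass over the code (no per-character branching).
-- _STEP = {
--     ('^', '^'): 'A',   ('^', 'A'): '>A',   ('^', '<'): 'v<A',  ('^', 'v'): 'vA',  ('^', '>'): '>vA',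
--     ('A', '^'): '<A',  ('A', 'A'): 'A',    ('A', '<'): 'v<<A', ('A', 'v'): '<vA', ('A', '>'): 'vA',
--     ('<', '^'): '^>A', ('<', 'A'): '^>>A', ('<', '<'): 'A',    ('<', 'v'): '>A',  ('<', '>'): '>>A',
--     ('v', '^'): '^A',  ('v', 'A'): '^>A',  ('v', '<'): '<A',   ('v', 'v'): 'A',   ('v', '>'): '>A',
--     ('>', '^'): '^<A', ('>', 'A'): '^A',   ('>', '<'): '<<A',  ('>', 'v'): '<A',  ('>', '>'): 'A',
-- }
--
-- def type_keypad(code: str) -> str: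
--     parts = []
--     prev = 'A'
--     for c in code:
--         parts.append(_STEP[(prev, c)])
--         prev = c
--     return ''.join(parts)
-- ===== Notes on version B (the rewrite author's own statement) =====
-- stated objective: alternative
-- what changed: Replaces per-character coordinate arithmetic and gap-ordering branching with a precomputed 25-entry transition table keyed by (previous, next) button, so the main loop is a single table lookup per character.
import Mathlib
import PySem

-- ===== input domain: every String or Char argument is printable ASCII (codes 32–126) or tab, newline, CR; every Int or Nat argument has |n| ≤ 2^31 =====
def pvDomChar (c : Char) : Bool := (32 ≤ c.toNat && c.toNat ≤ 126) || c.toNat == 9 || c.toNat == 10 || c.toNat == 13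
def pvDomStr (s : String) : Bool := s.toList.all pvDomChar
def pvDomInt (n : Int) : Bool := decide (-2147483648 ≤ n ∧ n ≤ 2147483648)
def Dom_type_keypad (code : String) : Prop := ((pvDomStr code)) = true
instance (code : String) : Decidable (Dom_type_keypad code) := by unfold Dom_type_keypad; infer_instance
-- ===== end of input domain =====

-- B replaces A's per-character coordinate arithmetic and branching by a precomputed
-- 25-entry (prev, next) → moves transition table looked up once per character (alternative).


-- ===== PORT A =====
def pvPadMap : PySem.Dict Char (Int × Int) :=
  PySem.Dict.ofList [('^', (0, 1)), ('A', (0, 2)), ('<', (1, 0)), ('v', (1, 1)), ('>', (1, 2))]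

-- one iteration of A's loop; "c" * k (k possibly ≤ 0 → empty) is List.replicate k.toNat c, exact
def pvStepA (st : Int × Int × List Char) (n : Char) : Option (Int × Int × List Char) :=
  match pvPadMap.get? n with
  | none => none   -- pad_map[n] raises KeyError; excluded by Pre_
  | some (ny, nx) =>
    let cy := st.1; let cx := st.2.1; let moves := st.2.2
    let moves :=
      if cy > ny then
        let m := if n ≠ '<' then moves ++ List.replicate (cy - ny).toNat '^' else moves
        let m := if cx > nx then m ++ List.replicate (cx - nx).toNat '<'
                 else m ++ List.replicate (nx - cx).toNat '>'
        if n = '<' then m ++ List.replicate (cy - ny).toNat '^' else m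
      else
        let m := if n = '<' then moves ++ List.replicate (ny - cy).toNat 'v' else moves
        let m := if cx > nx then m ++ List.replicate (cx - nx).toNat '<'
                 else m ++ List.replicate (nx - cx).toNat '>'
        if n ≠ '<' then m ++ List.replicate (ny - cy).toNat 'v' else m
    some (ny, nx, moves ++ ['A'])

def type_keypad (code : String) : String :=
  match code.toList.foldl (fun st? n => st?.bind (fun st => pvStepA st n)) (some (0, 2, ([] : List Char))) with
  | some (_, _, moves) => String.mk moves
  | none => ""   -- unreachable under Pre_

-- ===== PORT B =====
-- the hardcoded transition table of Source B; none = KeyError (excluded by Pre_)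
def pvStep? (p c : Char) : Option (List Char) :=
  match p, c with
  | '^', '^' => some ['A']           | '^', 'A' => some ['>', 'A']
  | '^', '<' => some ['v', '<', 'A'] | '^', 'v' => some ['v', 'A']
  | '^', '>' => some ['>', 'v', 'A']
  | 'A', '^' => some ['<', 'A']      | 'A', 'A' => some ['A']
  | 'A', '<' => some ['v', '<', '<', 'A'] | 'A', 'v' => some ['<', 'v', 'A']
  | 'A', '>' => some ['v', 'A']
  | '<', '^' => some ['^', '>', 'A'] | '<', 'A' => some ['^', '>', '>', 'A']
  | '<', '<' => some ['A']           | '<', 'v' => some ['>', 'A']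
  | '<', '>' => some ['>', '>', 'A']
  | 'v', '^' => some ['^', 'A']      | 'v', 'A' => some ['^', '>', 'A']
  | 'v', '<' => some ['<', 'A']      | 'v', 'v' => some ['A']
  | 'v', '>' => some ['>', 'A']
  | '>', '^' => some ['^', '<', 'A'] | '>', 'A' => some ['^', 'A']
  | '>', '<' => some ['<', '<', 'A'] | '>', 'v' => some ['<', 'A']
  | '>', '>' => some ['A']
  | _, _ => none

def type_keypad_alt (code : String) : String :=
  match code.toList.foldl
      (fun acc c => acc.bind (fun pr => (pvStep? pr.1 c).map (fun w => (c, pr.2 ++ w))))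
      (some ('A', ([] : List Char))) with
  | some (_, parts) => String.mk parts
  | none => ""   -- unreachable under Pre_

-- ===== PRECONDITION & SPEC =====
-- Pre_ excludes exactly the codes containing a character outside the pad, on which Python A raises KeyError.
def Pre_type_keypad (code : String) : Prop :=
  code.toList.all (fun c => c = '^' || c = 'A' || c = '<' || c = 'v' || c = '>') = true
instance (code : String) : Decidable (Pre_type_keypad code) := by unfold Pre_type_keypad; infer_instance

def pvWitness_type_keypad : String := "<vA>^"

def Spec_type_keypad (code : String) (out : String) : Prop := out = type_keypad_alt code
instance (code : String) (out : String) : Decidable (Spec_type_keypad code out) := by unfold Spec_type_keypad; infer_instance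

-- ===== CLAIM (what is proved, stated in full; the proofs are below) =====
def Claim_equal_type_keypad : Prop := ∀ (code : String), Dom_type_keypad code → Pre_type_keypad code → Spec_type_keypad code (type_keypad code)

-- ===== LEMMAS AND PROOFS =====
def pvKey (c : Char) : Bool := c = '^' || c = 'A' || c = '<' || c = 'v' || c = '>'

def pvPos (c : Char) : Int × Int :=
  match c with
  | '^' => (0, 1) | 'A' => (0, 2) | '<' => (1, 0) | 'v' => (1, 1) | _ => (1, 2)

lemma pvStepA_eq (p c : Char) (hp : pvKey p = true) (hc : pvKey c = true) (m : List Char) :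
    pvStepA ((pvPos p).1, (pvPos p).2, m) c
      = (pvStep? p c).map (fun w => ((pvPos c).1, (pvPos c).2, m ++ w)) := by
  simp [pvKey] at hp hc
  rcases hp with (((rfl | rfl) | rfl) | rfl) | rfl <;>
    rcases hc with (((rfl | rfl) | rfl) | rfl) | rfl <;>
      simp [pvStepA, pvStep?, pvPos, pvPadMap, PySem.Dict.ofList, PySem.Dict.get?, PySem.Dict.update,
            PySem.Dict.insert, PySem.Dict.empty, PySem.Dict.items, List.find?, List.replicate]

lemma pvLoop_eq (l : List Char) (p : Char) (m : List Char)
    (hp : pvKey p = true) (hl : ∀ c ∈ l, pvKey c = true) :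
    l.foldl (fun st? n => st?.bind (fun st => pvStepA st n)) (some ((pvPos p).1, (pvPos p).2, m))
      = (l.foldl (fun acc c => acc.bind (fun pr => (pvStep? pr.1 c).map (fun w => (c, pr.2 ++ w))))
          (some (p, m))).map (fun pr => ((pvPos pr.1).1, (pvPos pr.1).2, pr.2)) := by
  induction l generalizing p m with
  | nil => simp
  | cons c l ih =>
    have hc : pvKey c = true := hl c (by simp)
    have hl' : ∀ d ∈ l, pvKey d = true := fun d hd => hl d (by simp [hd])
    have htbl : ∃ w, pvStep? p c = some w := by
      simp [pvKey] at hp hc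
      rcases hp with (((rfl | rfl) | rfl) | rfl) | rfl <;>
        rcases hc with (((rfl | rfl) | rfl) | rfl) | rfl <;> exact ⟨_, rfl⟩
    obtain ⟨w, hw⟩ := htbl
    simp only [List.foldl_cons, Option.bind_some, pvStepA_eq p c hp hc m, hw, Option.map_some]
    exact ih c (m ++ w) hc hl'

-- ===== VERDICT (by name: the statement is the Claim_ definition above) =====
theorem type_keypad_spec : Claim_equal_type_keypad := by
  intro code _ hpre
  unfold Spec_type_keypad type_keypad type_keypad_alt
  have hl : ∀ c ∈ code.toList, pvKey c = true := by
    unfold Pre_type_keypad at hpre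
    simpa [List.all_eq_true, pvKey] using hpre
  have h := pvLoop_eq code.toList 'A' [] (by decide) hl
  have hA : (pvPos 'A').1 = (0 : Int) ∧ (pvPos 'A').2 = (2 : Int) := by decide
  rw [hA.1, hA.2] at h
  rw [h]
  cases code.toList.foldl (fun acc c => acc.bind (fun pr => (pvStep? pr.1 c).map (fun w => (c, pr.2 ++ w)))) (some ('A', ([] : List Char))) with
  | none => rfl
  | some pr => rfl
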